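-- pv_equiv track=rewrite | github.com/DeveloperYun/codetree-TILs | 231222/순위 경쟁2/ranking-competition2.py | count_hall_of_fame_changes
-- ===== SOURCE A (Python) =====
-- def count_hall_of_fame_changes(n, changes):
--     hall_of_fame_changes = 0
--     scores = {'A': 0, 'B': 0}
--     hall_of_fame = set()
--
--     for i in range(n):
--         player, score_change = changes[i]
--         scores[player] += score_change
--
--         max_score = max(scores.values())
--
--         new_hall_of_fame = {player for player, score in scores.items() if score == max_score}
--
--         if new_hall_of_fame != hall_of_fame:
--             hall_of_fame_changes += 1
--             hall_of_fame = new_hall_of_fame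
--
--     return hall_of_fame_changes
-- ===== SOURCE B (Python) =====
-- def count_hall_of_fame_changes(n, changes):
--     # Stage 1: prefix-scan the signed lead of A over B into a sign sequence
--     # (1 A leads, -1 B leads, 0 tied). Stage 2: the answer is the number of
--     # maximal runs of equal signs, counted from adjacent pairs.
--     lead = []
--     t = 0
--     for player, score_change in changes[:max(n, 0)]:
--         t += score_change if player == 'A' else -score_change
--         lead.append((t > 0) - (t < 0))
--     if not lead:
--         return 0
--     return 1 + sum(1 for prev, cur in zip(lead, lead[1:]) if cur != prev)
-- ===== Notes on version B (the rewrite author's own statement) =====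
-- stated objective: alternative
-- what changed: Replaces the single pass maintaining a scores dict and leader set by two staged passes: a prefix scan producing the sign sequence of A's cumulative lead, then a run count over adjacent pairs of that sequence (no per-step state comparison, no dict/set).
import Mathlib
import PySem

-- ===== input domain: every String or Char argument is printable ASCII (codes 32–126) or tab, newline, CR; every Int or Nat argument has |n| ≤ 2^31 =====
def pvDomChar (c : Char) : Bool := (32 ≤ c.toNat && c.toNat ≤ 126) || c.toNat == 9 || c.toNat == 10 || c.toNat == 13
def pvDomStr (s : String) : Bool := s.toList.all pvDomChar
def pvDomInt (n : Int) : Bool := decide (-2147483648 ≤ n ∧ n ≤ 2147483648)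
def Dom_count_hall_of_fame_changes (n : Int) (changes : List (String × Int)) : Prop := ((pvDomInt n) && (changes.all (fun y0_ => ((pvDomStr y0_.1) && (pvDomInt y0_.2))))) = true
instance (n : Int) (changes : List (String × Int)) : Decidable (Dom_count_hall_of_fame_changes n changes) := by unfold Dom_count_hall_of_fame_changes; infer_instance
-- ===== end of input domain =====

-- B replaces A's single pass over a scores dict and leader set by two staged
-- passes: a sign-sequence prefix scan, then a run count over adjacent pairs
-- (objective: alternative, same cost).


-- ===== PORT A =====
-- loop body of A, per element pc = changes[i]: scores[player] += score_change,
-- recompute the leader set from max(scores.values()) and compare to the old one.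
-- Dict.getD is the total form of scores[player] (KeyError excluded by Pre_).
def hofStepA' (st : Int × PySem.Dict String Int × PySem.Set String) (pc : String × Int) :
    Int × PySem.Dict String Int × PySem.Set String :=
  let scores := st.2.1.insert pc.1 (st.2.1.getD pc.1 0 + pc.2)
  let maxScore := (PySem.List.max? scores.values (fun x => x)).getD 0
  let newHall : PySem.Set String :=
    PySem.Set.ofList ((scores.items.filter (fun p => p.2 == maxScore)).map Prod.fst)
  if ¬ (PySem.Set.equal newHall st.2.2 = true) then (st.1 + 1, scores, newHall)
  else (st.1, scores, st.2.2)

-- pyGetD is the total form of changes[i] (IndexError excluded by Pre_)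
def hofStepA (changes : List (String × Int)) (st : Int × PySem.Dict String Int × PySem.Set String) (i : Int) :
    Int × PySem.Dict String Int × PySem.Set String :=
  hofStepA' st (PySem.List.pyGetD changes i ("", 0))

def count_hall_of_fame_changes (n : Int) (changes : List (String × Int)) : Int :=
  ((PySem.List.pyRange 0 n 1).foldl (hofStepA changes)
      (0, PySem.Dict.insert (PySem.Dict.insert PySem.Dict.empty "A" 0) "B" 0,
        (PySem.Set.empty : PySem.Set String))).1

-- ===== PORT B =====
-- stage-1 loop body of B: cumulate the signed lead t, append its sign (t>0)-(t<0)
def hofSign (t : Int) : Int := (if t > 0 then 1 else 0) - (if t < 0 then 1 else 0)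

def hofLeadStep (st : Int × List Int) (pc : String × Int) : Int × List Int :=
  let t := st.1 + (if pc.1 == "A" then pc.2 else -pc.2)
  (t, st.2 ++ [hofSign t])

def count_hall_of_fame_changes_alt (n : Int) (changes : List (String × Int)) : Int :=
  let lead := ((PySem.List.slice changes none (some (max n 0))).foldl hofLeadStep (0, [])).2
  if lead = [] then 0
  else 1 + (lead.zip (PySem.List.slice lead (some 1) none)).foldl
      (fun acc p => if p.2 ≠ p.1 then acc + 1 else acc) 0

-- ===== PRECONDITION & SPEC =====
-- Pre_ excludes exactly the inputs where A raises: IndexError (n > len(changes))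
-- or KeyError (a player other than "A"/"B" among the first n entries).
def Pre_count_hall_of_fame_changes (n : Int) (changes : List (String × Int)) : Prop :=
  n ≤ (changes.length : Int) ∧ ∀ p ∈ changes.take n.toNat, p.1 = "A" ∨ p.1 = "B"
instance (n : Int) (changes : List (String × Int)) : Decidable (Pre_count_hall_of_fame_changes n changes) := by
  unfold Pre_count_hall_of_fame_changes; infer_instance

def pvWitness_count_hall_of_fame_changes : Int × (List (String × Int)) := (2, [("A", 3), ("B", 5)])

def Spec_count_hall_of_fame_changes (n : Int) (changes : List (String × Int)) (out : Int) : Prop :=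
  out = count_hall_of_fame_changes_alt n changes
instance (n : Int) (changes : List (String × Int)) (out : Int) : Decidable (Spec_count_hall_of_fame_changes n changes out) := by
  unfold Spec_count_hall_of_fame_changes; infer_instance

-- ===== CLAIM (what is proved, stated in full; the proofs are below) =====
def Claim_equal_count_hall_of_fame_changes : Prop := ∀ (n : Int) (changes : List (String × Int)), Dom_count_hall_of_fame_changes n changes → Pre_count_hall_of_fame_changes n changes → Spec_count_hall_of_fame_changes n changes (count_hall_of_fame_changes n changes)

-- ===== LEMMAS AND PROOFS =====

-- PROOF-ONLY intermediate: a single-pass sign machine (a, b, count, prev sign;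
-- prev = 2 is the initial sentinel) that both ports are related to.
def hofStepB (st : Int × Int × Int × Int) (pc : String × Int) : Int × Int × Int × Int :=
  let a := if pc.1 == "A" then st.1 + pc.2 else st.1
  let b := if pc.1 == "A" then st.2.1 else st.2.1 + pc.2
  let cur : Int := if a > b then 1 else if a < b then -1 else 0
  if cur ≠ st.2.2.2 then (a, b, st.2.2.1 + 1, cur) else (a, b, st.2.2.1, st.2.2.2)

-- the only score dicts reachable in A
def hofScores (a b : Int) : PySem.Dict String Int := PySem.Dict.mk [("A", a), ("B", b)]

-- the leader set A stores, as a function of the sign the machine stores (2 = sentinel)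
def hofHall (p : Int) : PySem.Set String :=
  if p = 2 then [] else if p = 1 then ["A"] else if p = -1 then ["B"] else ["A", "B"]

-- A's loop state as a function of the sign machine's loop state
def hofMap (st : Int × Int × Int × Int) : Int × PySem.Dict String Int × PySem.Set String :=
  (st.2.2.1, hofScores st.1 st.2.1, hofHall st.2.2.2)

lemma hof_insert_A (a b d : Int) :
    (hofScores a b).insert "A" ((hofScores a b).getD "A" 0 + d) = hofScores (a + d) b := by
  simp [hofScores, PySem.Dict.insert, PySem.Dict.getD, PySem.Dict.get?, PySem.Dict.contains]

lemma hof_insert_B (a b d : Int) :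
    (hofScores a b).insert "B" ((hofScores a b).getD "B" 0 + d) = hofScores a (b + d) := by
  simp [hofScores, PySem.Dict.insert, PySem.Dict.getD, PySem.Dict.get?, PySem.Dict.contains]

lemma hof_max (a b : Int) :
    (PySem.List.max? (hofScores a b).values (fun x => x)).getD 0 = max a b := by
  simp [hofScores, PySem.Dict.values, PySem.List.max?_id_cons]

lemma hof_newHall (a b : Int) :
    PySem.Set.ofList (((hofScores a b).items.filter (fun p => p.2 == max a b)).map Prod.fst)
      = hofHall (if a > b then 1 else if a < b then -1 else 0) := by
  rcases lt_trichotomy a b with h | h | h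
  · simp [hofScores, hofHall, h, h.ne, not_lt_of_gt h, max_eq_right h.le,
      PySem.Set.ofList, PySem.Set.add, PySem.Set.contains]
  · subst h
    simp [hofScores, hofHall, PySem.Set.ofList, PySem.Set.add, PySem.Set.contains]
  · have hb : (b == a) = false := by simp [h.ne]
    simp [hofScores, hofHall, h, max_eq_left h.le, hb,
      PySem.Set.ofList, PySem.Set.add, PySem.Set.contains]

lemma hofStep_eq_A (a b cnt prev d : Int)
    (hprev : prev = 2 ∨ prev = 1 ∨ prev = 0 ∨ prev = -1) :
    hofStepA' (cnt, hofScores a b, hofHall prev) ("A", d) = hofMap (hofStepB (a, b, cnt, prev) ("A", d)) := by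
  rcases hprev with rfl | rfl | rfl | rfl <;>
    rcases lt_trichotomy b (a + d) with h | h | h <;>
  · simp only [hofStepA', hofStepB, hofMap]
    rw [hof_insert_A, hof_max, hof_newHall]
    first
      | simp [h, not_lt_of_gt h, hofHall,
          PySem.Set.equal, PySem.Set.issubset, PySem.Set.contains]
      | simp [h, hofHall, PySem.Set.equal, PySem.Set.issubset, PySem.Set.contains]

lemma hofStep_eq_B (a b cnt prev d : Int)
    (hprev : prev = 2 ∨ prev = 1 ∨ prev = 0 ∨ prev = -1) :
    hofStepA' (cnt, hofScores a b, hofHall prev) ("B", d) = hofMap (hofStepB (a, b, cnt, prev) ("B", d)) := by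
  rcases hprev with rfl | rfl | rfl | rfl <;>
    rcases lt_trichotomy (b + d) a with h | h | h <;>
  · simp only [hofStepA', hofStepB, hofMap]
    rw [hof_insert_B, hof_max, hof_newHall]
    first
      | simp [h, not_lt_of_gt h, hofHall,
          PySem.Set.equal, PySem.Set.issubset, PySem.Set.contains]
      | simp [h, hofHall, PySem.Set.equal, PySem.Set.issubset, PySem.Set.contains]

lemma hofStep_eq (pc : String × Int) (a b cnt prev : Int)
    (hpc : pc.1 = "A" ∨ pc.1 = "B")
    (hprev : prev = 2 ∨ prev = 1 ∨ prev = 0 ∨ prev = -1) :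
    hofStepA' (cnt, hofScores a b, hofHall prev) pc = hofMap (hofStepB (a, b, cnt, prev) pc) := by
  obtain ⟨p, d⟩ := pc
  rcases hpc with h | h <;> dsimp only at h <;> subst h
  · exact hofStep_eq_A a b cnt prev d hprev
  · exact hofStep_eq_B a b cnt prev d hprev

lemma hofStepB_prev (st : Int × Int × Int × Int) (pc : String × Int)
    (h : st.2.2.2 = 2 ∨ st.2.2.2 = 1 ∨ st.2.2.2 = 0 ∨ st.2.2.2 = -1) :
    (hofStepB st pc).2.2.2 = 2 ∨ (hofStepB st pc).2.2.2 = 1 ∨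
      (hofStepB st pc).2.2.2 = 0 ∨ (hofStepB st pc).2.2.2 = -1 := by
  simp only [hofStepB]
  split_ifs <;> simp_all

lemma hof_loop_inv (l : List (String × Int)) :
    ∀ (a b cnt prev : Int), (∀ p ∈ l, p.1 = "A" ∨ p.1 = "B") →
    (prev = 2 ∨ prev = 1 ∨ prev = 0 ∨ prev = -1) →
    l.foldl hofStepA' (cnt, hofScores a b, hofHall prev) = hofMap (l.foldl hofStepB (a, b, cnt, prev)) := by
  induction l with
  | nil => intro a b cnt prev _ _; rfl
  | cons pc t ih =>
    intro a b cnt prev hl hprev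
    have h1 : pc.1 = "A" ∨ pc.1 = "B" := hl pc (List.mem_cons_self ..)
    simp only [List.foldl_cons]
    rw [hofStep_eq pc a b cnt prev h1 hprev]
    have h2 := hofStepB_prev (a, b, cnt, prev) pc hprev
    exact ih (hofStepB (a, b, cnt, prev) pc).1 (hofStepB (a, b, cnt, prev) pc).2.1
      (hofStepB (a, b, cnt, prev) pc).2.2.1 (hofStepB (a, b, cnt, prev) pc).2.2.2
      (fun p hp => hl p (List.mem_cons_of_mem _ hp)) h2

-- A's index loop over range(n), with n ≤ len(changes), is the element loop
-- over the prefix changes[:n]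
lemma hof_fold_take (changes : List (String × Int)) (n : Int)
    (init : Int × PySem.Dict String Int × PySem.Set String)
    (h0 : 0 ≤ n) (hlen : n ≤ (changes.length : Int)) :
    (PySem.List.pyRange 0 n 1).foldl (hofStepA changes) init
      = (changes.take n.toNat).foldl hofStepA' init := by
  have hm : n.toNat ≤ changes.length := by omega
  have hl : PySem.List.len (changes.take n.toNat) = n := by
    simp [PySem.List.len, List.length_take, min_eq_left hm]; omega
  have step : ∀ (acc : Int × PySem.Dict String Int × PySem.Set String), ∀ j ∈ PySem.List.pyRange 0 n 1,
      hofStepA changes acc j = hofStepA' acc (PySem.List.pyGetD (changes.take n.toNat) j ("", 0)) := by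
    intro acc j hj
    rw [PySem.List.mem_pyRange_one] at hj
    have hj1 : j.toNat < n.toNat := by omega
    unfold hofStepA
    rw [PySem.List.pyGetD_of_nonneg _ _ hj.1, PySem.List.pyGetD_of_nonneg _ _ hj.1]
    congr 1
    rw [List.getD_eq_getElem?_getD, List.getD_eq_getElem?_getD]
    rw [List.getElem?_take]
    simp [hj1]
  rw [PySem.List.foldl_congr_mem _ _ _ _ step]
  rw [show PySem.List.pyRange 0 n 1 = PySem.List.pyRange 0 (PySem.List.len (changes.take n.toNat)) 1 from by rw [hl]]
  exact PySem.List.foldl_pyRange_zero_pyGetD _ _ _ _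

-- ---- relating the sign machine to B's staged passes ----

def hofDelta (pc : String × Int) : Int := if pc.1 == "A" then pc.2 else -pc.2

-- recursive form of B's stage-1 sign sequence
def hofLeadRec (t : Int) : List (String × Int) → List Int
  | [] => []
  | pc :: l => hofSign (t + hofDelta pc) :: hofLeadRec (t + hofDelta pc) l

-- run-boundary count of a sign list relative to a previous sign
def hofRuns (prev : Int) : List Int → Int
  | [] => 0
  | s :: l => (if s = prev then 0 else 1) + hofRuns s l

lemma hofLead_spec (l : List (String × Int)) :
    ∀ (t : Int) (acc : List Int), (l.foldl hofLeadStep (t, acc)).2 = acc ++ hofLeadRec t l := by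
  induction l with
  | nil => simp [hofLeadRec]
  | cons pc tl ih => intro t acc; simp [hofLeadStep, hofLeadRec, hofDelta, ih]

lemma hofStepB_count (l : List (String × Int)) :
    ∀ (a b cnt prev : Int),
      (l.foldl hofStepB (a, b, cnt, prev)).2.2.1 = cnt + hofRuns prev (hofLeadRec (a - b) l) := by
  induction l with
  | nil => intro a b cnt prev; simp [hofLeadRec, hofRuns]
  | cons pc tl ih =>
    intro a b cnt prev
    obtain ⟨p, d⟩ := pc
    by_cases hp : p == "A"
    · have hd : hofDelta (p, d) = d := by simp [hofDelta, hp]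
      have hstep : hofStepB (a, b, cnt, prev) (p, d)
          = (if hofSign (a - b + d) ≠ prev then (a + d, b, cnt + 1, hofSign (a - b + d))
             else (a + d, b, cnt, prev)) := by
        simp only [hofStepB, hp, if_true]
        rw [show (if a + d > b then (1 : Int) else if a + d < b then -1 else 0)
              = hofSign (a - b + d) from by unfold hofSign; split_ifs <;> omega]
      simp only [List.foldl_cons, hstep, hofLeadRec, hd, hofRuns]
      by_cases hc : hofSign (a - b + d) = prev
      · rw [if_neg (by simp [hc]), ih, show a + d - b = a - b + d from by ring, hc]
        omega
      · rw [if_pos hc, ih, show a + d - b = a - b + d from by ring, if_neg hc]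
        omega
    · have hd : hofDelta (p, d) = -d := by simp [hofDelta, hp]
      have hstep : hofStepB (a, b, cnt, prev) (p, d)
          = (if hofSign (a - b + -d) ≠ prev then (a, b + d, cnt + 1, hofSign (a - b + -d))
             else (a, b + d, cnt, prev)) := by
        simp only [hofStepB, hp, Bool.false_eq_true, if_false]
        rw [show (if a > b + d then (1 : Int) else if a < b + d then -1 else 0)
              = hofSign (a - b + -d) from by unfold hofSign; split_ifs <;> omega]
      simp only [List.foldl_cons, hstep, hofLeadRec, hd, hofRuns]
      by_cases hc : hofSign (a - b + -d) = prev
      · rw [if_neg (by simp [hc]), ih, show a - (b + d) = a - b + -d from by ring, hc]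
        omega
      · rw [if_pos hc, ih, show a - (b + d) = a - b + -d from by ring, if_neg hc]
        omega

lemma hofSign_ne_two (t : Int) : hofSign t ≠ 2 := by
  unfold hofSign; split_ifs <;> omega

lemma hofZip_count (l : List Int) :
    ∀ (s : Int) (acc : Int),
      (((s :: l).zip l).foldl (fun acc p => if p.2 ≠ p.1 then acc + 1 else acc) acc)
        = acc + hofRuns s l := by
  induction l with
  | nil => intro s acc; simp [hofRuns]
  | cons c tl ih =>
    intro s acc
    simp only [List.zip_cons_cons, List.foldl_cons, hofRuns]
    by_cases hc : c = s
    · rw [if_neg (by simp [hc]), ih, hc]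
      omega
    · rw [if_pos hc, ih]
      rw [if_neg hc]
      omega

-- ===== VERDICT (by name: the statement is the Claim_ definition above) =====
theorem count_hall_of_fame_changes_spec : Claim_equal_count_hall_of_fame_changes := by
  intro n changes _ hpre
  obtain ⟨hn, hkeys⟩ := hpre
  unfold Spec_count_hall_of_fame_changes
  unfold count_hall_of_fame_changes count_hall_of_fame_changes_alt
  by_cases h0 : n ≤ 0
  · rw [PySem.List.pyRange_one_eq_nil h0]
    rw [show max n 0 = 0 from by omega, PySem.List.slice_to _ (le_refl 0)]
    rfl
  · have h0' : 0 < n := by omega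
    rw [show max n 0 = n from by omega, PySem.List.slice_to _ h0'.le]
    rw [hof_fold_take changes n _ h0'.le hn]
    have hinit : ((0 : Int), PySem.Dict.insert (PySem.Dict.insert PySem.Dict.empty "A" 0) "B" 0,
        (PySem.Set.empty : PySem.Set String)) = ((0 : Int), hofScores 0 0, hofHall 2) := by decide
    rw [hinit, hof_loop_inv _ 0 0 0 2 hkeys (Or.inl rfl)]
    simp only [hofMap]
    rw [hofStepB_count, hofLead_spec, List.nil_append]
    rw [show (0 : Int) - 0 = 0 from by ring]
    cases hld : hofLeadRec 0 (changes.take n.toNat) with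
    | nil => simp [hofRuns]
    | cons s rest =>
      have hs2 : s ≠ 2 := by
        cases htk : changes.take n.toNat with
        | nil => rw [htk] at hld; simp [hofLeadRec] at hld
        | cons pc l =>
          rw [htk] at hld
          simp only [hofLeadRec, List.cons.injEq] at hld
          rw [← hld.1]; exact hofSign_ne_two _
      rw [PySem.List.slice_from_one]
      simp only [List.tail_cons, if_neg (List.cons_ne_nil s rest)]
      rw [hofZip_count rest s 0, hofRuns]
      simp [hs2]
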